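-- pv_equiv track=rewrite | github.com/imredavid64-glitch/MultiLLM | ai_client.py | select_bot_configs
-- ===== SOURCE A (Python) =====
-- from typing import Dict, Iterable, List, Protocol, Sequence, Set, Tuple
--
-- BOT_PERSONAS: List[Tuple[str, str]] = [
--     ("Factual Analyst", "Prioritize precise facts and explicit assumptions."),
--     ("Skeptical Reviewer", "Challenge weak claims and point out uncertainty."),
--     ("Neutral Teacher", "Explain clearly for non-experts with minimal jargon."),
--     ("Risk Auditor", "Look for safety, privacy, and compliance risks."),
--     ("Counter-Bias Bot", "Actively detect one-sided framing and rebalance perspectives."),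
-- ]
--
-- def select_bot_configs(bot_count: int) -> List[Tuple[str, str]]:
--     configs = []
--     idx = 0
--     while len(configs) < bot_count:
--         persona = BOT_PERSONAS[idx % len(BOT_PERSONAS)]
--         suffix = "" if idx < len(BOT_PERSONAS) else f" #{idx + 1}"
--         configs.append((persona[0] + suffix, persona[1]))
--         idx += 1
--     return configs
-- ===== SOURCE B (Python) =====
-- from typing import List, Tuple
--
-- BOT_PERSONAS: List[Tuple[str, str]] = [
--     ("Factual Analyst", "Prioritize precise facts and explicit assumptions."),
--     ("Skeptical Reviewer", "Challenge weak claims and point out uncertainty."),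
--     ("Neutral Teacher", "Explain clearly for non-experts with minimal jargon."),
--     ("Risk Auditor", "Look for safety, privacy, and compliance risks."),
--     ("Counter-Bias Bot", "Actively detect one-sided framing and rebalance perspectives."),
-- ]
--
-- def select_bot_configs(bot_count: int) -> List[Tuple[str, str]]:
--     # Generate whole persona cycles at a time (no per-item modulo or branch):
--     # the first cycle unsuffixed, each later cycle suffixed by its global
--     # position, overshooting bot_count, then truncate.
--     out = list(BOT_PERSONAS)
--     start = len(BOT_PERSONAS)
--     while len(out) < bot_count:
--         out.extend((name + f" #{start + j + 1}", prompt)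
--                    for j, (name, prompt) in enumerate(BOT_PERSONAS))
--         start += len(BOT_PERSONAS)
--     return out[:max(bot_count, 0)]
-- ===== Notes on version B (the rewrite author's own statement) =====
-- stated objective: alternative
-- what changed: Instead of appending one element per iteration with a per-item modulo and suffix branch, B emits whole persona cycles at a time (first cycle unsuffixed, later cycles always suffixed via enumerate), overshoots bot_count and truncates with a single slice.
import Mathlib
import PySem

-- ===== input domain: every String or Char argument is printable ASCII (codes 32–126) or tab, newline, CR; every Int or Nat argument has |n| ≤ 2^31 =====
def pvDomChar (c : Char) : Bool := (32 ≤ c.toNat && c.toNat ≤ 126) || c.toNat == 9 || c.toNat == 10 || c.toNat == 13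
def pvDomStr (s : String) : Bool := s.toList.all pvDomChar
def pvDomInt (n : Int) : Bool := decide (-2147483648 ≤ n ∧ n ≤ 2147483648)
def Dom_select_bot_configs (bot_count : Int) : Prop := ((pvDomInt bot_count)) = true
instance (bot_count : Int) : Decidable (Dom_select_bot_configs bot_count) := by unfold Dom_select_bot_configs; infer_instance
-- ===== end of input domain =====

-- B generates whole persona cycles at a time (no per-item modulo/branch), overshoots and
-- truncates once; objective: alternative decomposition, same values.

-- ===== PORT A =====
def BOT_PERSONAS : List (String × String) := [
  ("Factual Analyst", "Prioritize precise facts and explicit assumptions."),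
  ("Skeptical Reviewer", "Challenge weak claims and point out uncertainty."),
  ("Neutral Teacher", "Explain clearly for non-experts with minimal jargon."),
  ("Risk Auditor", "Look for safety, privacy, and compliance risks."),
  ("Counter-Bias Bot", "Actively detect one-sided framing and rebalance perspectives.")]

-- A's while-loop; idx % len is always in range so the pyGetD default is never used
def selLoopA (bot_count : Int) (idx : Nat) (configs : List (String × String)) :
    List (String × String) :=
  if _h : (configs.length : Int) < bot_count then
    let persona := PySem.List.pyGetD BOT_PERSONAS ((idx % BOT_PERSONAS.length : Nat) : Int) ("", "")
    let suffix := if (idx : Int) < (BOT_PERSONAS.length : Int) then ""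
                  else " #" ++ PySem.Int.toStr ((idx : Int) + 1)
    selLoopA bot_count (idx + 1) (configs ++ [(persona.1 ++ suffix, persona.2)])
  else configs
termination_by (bot_count - configs.length).toNat
decreasing_by simp only [List.length_append, List.length_cons, List.length_nil]; omega

def select_bot_configs (bot_count : Int) : List (String × String) :=
  selLoopA bot_count 0 []

-- ===== PORT B =====
-- one suffixed cycle: B's generator expression over enumerate(BOT_PERSONAS)
def blockB (start : Nat) : List (String × String) :=
  (PySem.List.enumerate BOT_PERSONAS).map (fun jp =>
    (jp.2.1 ++ " #" ++ PySem.Int.toStr ((start : Int) + jp.1 + 1), jp.2.2))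

theorem blockB_len (start : Nat) : (blockB start).length = 5 := by
  simp [blockB, BOT_PERSONAS]

-- B's while-loop: extend by a whole cycle until long enough
def selLoopB (bot_count : Int) (start : Nat) (out : List (String × String)) :
    List (String × String) :=
  if _h : (out.length : Int) < bot_count then
    selLoopB bot_count (start + BOT_PERSONAS.length) (out ++ blockB start)
  else out
termination_by (bot_count - out.length).toNat
decreasing_by simp only [List.length_append, blockB_len]; omega

-- out[:max(bot_count, 0)] with a nonnegative bound is List.take
def select_bot_configs_alt (bot_count : Int) : List (String × String) :=
  (selLoopB bot_count BOT_PERSONAS.length BOT_PERSONAS).take (max bot_count 0).toNat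

-- ===== PRECONDITION & SPEC =====
def Spec_select_bot_configs (bot_count : Int) (out : List (String × String)) : Prop := out = select_bot_configs_alt bot_count
instance (bot_count : Int) (out : List (String × String)) : Decidable (Spec_select_bot_configs bot_count out) := by unfold Spec_select_bot_configs; infer_instance

-- ===== CLAIM (what is proved, stated in full; the proofs are below) =====
def Claim_equal_select_bot_configs : Prop := ∀ (bot_count : Int), Dom_select_bot_configs bot_count → Spec_select_bot_configs bot_count (select_bot_configs bot_count)

-- ===== LEMMAS AND PROOFS =====

-- the element A appends at iteration idx (exactly A's loop body)
def fA (idx : Nat) : String × String :=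
  let persona := PySem.List.pyGetD BOT_PERSONAS ((idx % BOT_PERSONAS.length : Nat) : Int) ("", "")
  let suffix := if (idx : Int) < (BOT_PERSONAS.length : Int) then ""
                else " #" ++ PySem.Int.toStr ((idx : Int) + 1)
  (persona.1 ++ suffix, persona.2)

theorem selLoopA_spec (n : Nat) : ∀ (bc : Int) (idx : Nat) (configs : List (String × String)),
    configs.length = idx → (bc - idx).toNat = n →
    selLoopA bc idx configs = configs ++ (List.range' idx n).map fA := by
  induction n with
  | zero =>
    intro bc idx configs hlen hn
    rw [selLoopA, dif_neg (by omega)]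
    simp
  | succ m ih =>
    intro bc idx configs hlen hn
    rw [selLoopA, dif_pos (by omega)]
    rw [ih bc (idx + 1) _ (by simp [hlen]) (by omega)]
    simp [List.range', fA]

theorem fA_block (start j : Nat) (h5 : 5 ≤ start) (hm : start % 5 = 0) (hj : j < 5) :
    fA (start + j) =
      ((PySem.List.pyGetD BOT_PERSONAS (j : Int) ("", "")).1 ++ " #" ++
        PySem.Int.toStr ((start : Int) + (j : Int) + 1),
       (PySem.List.pyGetD BOT_PERSONAS (j : Int) ("", "")).2) := by
  have hlen : BOT_PERSONAS.length = 5 := by decide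
  have hmod : (start + j) % BOT_PERSONAS.length = j := by rw [hlen]; omega
  simp only [fA, hmod]
  rw [if_neg (by rw [hlen]; push_cast; omega),
      show ((start + j : Nat) : Int) = (start : Int) + (j : Int) by push_cast; ring,
      String.append_assoc]

theorem blockB_eq (start : Nat) (h5 : 5 ≤ start) (hm : start % 5 = 0) :
    blockB start = (List.range 5).map (fun j => fA (start + j)) := by
  rw [show (List.range 5) = [0,1,2,3,4] by decide]
  simp only [List.map]
  rw [fA_block start 0 h5 hm (by omega), fA_block start 1 h5 hm (by omega),
      fA_block start 2 h5 hm (by omega), fA_block start 3 h5 hm (by omega),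
      fA_block start 4 h5 hm (by omega)]
  simp only [blockB, BOT_PERSONAS, PySem.List.enumerate_cons, PySem.List.enumerate_nil,
    List.map]
  norm_num [PySem.List.pyGetD, PySem.List.pyIdx?, BOT_PERSONAS]
  decide

theorem selLoopB_spec (n : Nat) : ∀ (bc : Int) (start : Nat),
    (bc - start).toNat ≤ n → 5 ≤ start → start % 5 = 0 →
    ∃ m : Nat, bc ≤ (m : Int) ∧
      selLoopB bc start ((List.range start).map fA) = (List.range m).map fA := by
  induction n with
  | zero =>
    intro bc start hn h5 hm
    rw [selLoopB, dif_neg (by simp; omega)]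
    exact ⟨start, by omega, rfl⟩
  | succ k ih =>
    intro bc start hn h5 hm
    by_cases hlt : (start : Int) < bc
    · rw [selLoopB, dif_pos (by simpa using hlt)]
      have hB : BOT_PERSONAS.length = 5 := by decide
      have hstep : (List.range start).map fA ++ blockB start =
          (List.range (start + 5)).map fA := by
        rw [blockB_eq start h5 hm, List.range_add, List.map_append, List.map_map]
        rfl
      rw [hB, hstep]
      exact ih bc (start + 5) (by omega) (by omega) (by omega)
    · rw [selLoopB, dif_neg (by simpa using hlt)]
      exact ⟨start, by omega, rfl⟩

theorem personas_eq : BOT_PERSONAS = (List.range 5).map fA := by decide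

theorem alt_spec (bc : Int) : select_bot_configs_alt bc = (List.range bc.toNat).map fA := by
  unfold select_bot_configs_alt
  have hB : BOT_PERSONAS.length = 5 := by decide
  obtain ⟨m, hm, hrun⟩ := selLoopB_spec (bc - 5).toNat bc 5 (by omega) (by omega) (by omega)
  rw [hB, show selLoopB bc 5 BOT_PERSONAS = selLoopB bc 5 ((List.range 5).map fA) by
        rw [personas_eq],
      hrun, ← List.map_take, List.take_range]
  congr 1
  congr 1
  omega

-- ===== VERDICT (by name: the statement is the Claim_ definition above) =====
theorem select_bot_configs_spec : Claim_equal_select_bot_configs := by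
  intro bc _
  unfold Spec_select_bot_configs select_bot_configs
  rw [selLoopA_spec bc.toNat bc 0 [] rfl (by omega), alt_spec]
  simp [List.range_eq_range']
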